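-- pv_equiv track=rewrite | github.com/I14Y-ch/toolbox_concept_input | autoimport.py | infer_language_from_column
-- ===== SOURCE A (Python) =====
-- def infer_language_from_column(column_name):
--     """Heuristically detect the language from a column suffix."""
--     lowered = column_name.lower()
--     for delimiter in ['_', '-', ' ']:
--         if delimiter in lowered:
--             suffix = lowered.rsplit(delimiter, 1)[-1]
--             if suffix in {'de', 'fr', 'it', 'en', 'rm'}:
--                 return suffix
--     if lowered.endswith(('de', 'fr', 'it', 'en', 'rm')):
--         return lowered[-2:]
--     return None
-- ===== SOURCE B (Python) =====
-- def infer_language_from_column(column_name):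
--     """Heuristically detect the language from a column suffix."""
--     tail = column_name.lower()[-2:]
--     return tail if tail in {'de', 'fr', 'it', 'en', 'rm'} else None
-- ===== Notes on version B (the rewrite author's own statement) =====
-- stated objective: simpler
-- what changed: B removes A's three-delimiter rsplit-scanning loop entirely and just tests whether the last two lowercased characters are a known language code, since any code the loop can return is exactly that two-character tail.
import Mathlib
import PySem

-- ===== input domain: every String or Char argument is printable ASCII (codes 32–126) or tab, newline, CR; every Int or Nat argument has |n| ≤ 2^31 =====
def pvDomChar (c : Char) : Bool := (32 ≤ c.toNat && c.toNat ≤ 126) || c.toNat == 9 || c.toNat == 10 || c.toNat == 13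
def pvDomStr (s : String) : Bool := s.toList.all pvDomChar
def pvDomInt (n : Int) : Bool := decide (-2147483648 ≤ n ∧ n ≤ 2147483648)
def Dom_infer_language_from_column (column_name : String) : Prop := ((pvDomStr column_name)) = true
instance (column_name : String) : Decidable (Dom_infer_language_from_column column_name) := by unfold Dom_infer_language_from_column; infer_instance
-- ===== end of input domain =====

-- B drops A's three-delimiter scanning loop entirely: it just takes the last two characters and tests membership (simpler; same values).

-- ===== PORT A =====
def pvCodes : List (List Char) := [['d','e'], ['f','r'], ['i','t'], ['e','n'], ['r','m']]

-- exact hand port of `lowered.rsplit(delimiter, 1)[-1]` under `delimiter in lowered`: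
-- the text after the LAST occurrence of the delimiter (PySem has no rsplit primitive).
def pvAfterLast (cs : List Char) (d : Char) : List Char :=
  cs.drop ((PySem.Chars.rfind cs [d]).toNat + 1)

-- one iteration of A's `for delimiter in ['_', '-', ' ']` body; `some` = early return
def pvLoopStep (lowered : List Char) (d : Char) : Option (List Char) :=
  if PySem.Chars.isIn [d] lowered then
    let suffix := pvAfterLast lowered d
    if suffix ∈ pvCodes then some suffix else none
  else none

def infer_language_from_column (column_name : String) : Option String :=
  let lowered := PySem.Chars.lower column_name.toList
  match List.findSome? (pvLoopStep lowered) ['_', '-', ' '] with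
  | some suffix => some (String.ofList suffix)
  | none =>
    if pvCodes.any (fun c => PySem.Chars.endswith lowered c) then
      some (String.ofList (PySem.List.slice lowered (some (-2)) none))
    else none

-- ===== PORT B =====
def infer_language_from_column_alt (column_name : String) : Option String :=
  let tail := PySem.List.slice (PySem.Chars.lower column_name.toList) (some (-2)) none
  if tail ∈ pvCodes then some (String.ofList tail) else none

-- ===== PRECONDITION & SPEC =====
def Spec_infer_language_from_column (column_name : String) (out : Option String) : Prop := out = infer_language_from_column_alt column_name
instance (column_name : String) (out : Option String) : Decidable (Spec_infer_language_from_column column_name out) := by unfold Spec_infer_language_from_column; infer_instance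

-- ===== CLAIM (what is proved, stated in full; the proofs are below) =====
def Claim_equal_infer_language_from_column : Prop := ∀ (column_name : String), Dom_infer_language_from_column column_name → Spec_infer_language_from_column column_name (infer_language_from_column column_name)

-- ===== LEMMAS AND PROOFS =====

-- the tail slice lowered[-2:] is literally a drop
lemma tail_eq_drop (cs : List Char) :
    PySem.List.slice cs (some (-2)) none = cs.drop (cs.length - 2) := by
  exact PySem.List.slice_from_neg_ofNat cs 2 (by omega)

-- a length-2 suffix of cs IS cs.drop (cs.length - 2)
lemma suffix_len2 (c cs : List Char) (hc : c.length = 2) (h : c <:+ cs) :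
    cs.drop (cs.length - 2) = c := by
  obtain ⟨t, rfl⟩ := h
  simp [List.length_append, hc, List.drop_left']

-- every known code has two characters
lemma mem_pvCodes_length (c : List Char) (h : c ∈ pvCodes) : c.length = 2 := by
  fin_cases h <;> rfl

-- if A's loop body fires, the returned suffix is exactly the tail and lies in pvCodes
lemma loopStep_some (lowered : List Char) (d : Char) (s : List Char)
    (h : pvLoopStep lowered d = some s) :
    s = PySem.List.slice lowered (some (-2)) none ∧ s ∈ pvCodes := by
  unfold pvLoopStep at h
  by_cases h1 : PySem.Chars.isIn [d] lowered = true
  · rw [if_pos h1] at h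
    by_cases h2 : pvAfterLast lowered d ∈ pvCodes
    · rw [if_pos h2] at h
      obtain rfl : pvAfterLast lowered d = s := by exact Option.some.inj h
      have hsuf : pvAfterLast lowered d <:+ lowered := by
        unfold pvAfterLast; exact List.drop_suffix _ _
      rw [tail_eq_drop]
      exact ⟨(suffix_len2 _ _ (mem_pvCodes_length _ h2) hsuf).symm, h2⟩
    · rw [if_neg h2] at h; exact absurd h (by simp)
  · rw [if_neg h1] at h; exact absurd h (by simp)

lemma endswith_iff_tail (lowered c : List Char) (hc : c.length = 2) :
    PySem.Chars.endswith lowered c = true ↔ lowered.drop (lowered.length - 2) = c := by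
  rw [PySem.Chars.endswith_iff]
  constructor
  · exact suffix_len2 c lowered hc
  · intro h; rw [← h]; exact List.drop_suffix _ _

-- ===== VERDICT (by name: the statement is the Claim_ definition above) =====
theorem infer_language_from_column_spec : Claim_equal_infer_language_from_column := by
  intro column_name _
  unfold Spec_infer_language_from_column infer_language_from_column infer_language_from_column_alt
  set lowered := PySem.Chars.lower column_name.toList with hlow
  cases hfs : List.findSome? (pvLoopStep lowered) ['_', '-', ' '] with
  | some s =>
    simp only [hfs]
    obtain ⟨_, _, hstep⟩ := List.exists_of_findSome?_eq_some hfs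
    obtain ⟨hs, hmem⟩ := loopStep_some lowered _ s hstep
    subst hs
    simp [hmem]
  | none =>
    simp only [hfs]
    rw [tail_eq_drop]
    by_cases hmem : lowered.drop (lowered.length - 2) ∈ pvCodes
    · have hany : pvCodes.any (fun c => PySem.Chars.endswith lowered c) = true := by
        refine List.any_eq_true.mpr ⟨_, hmem, ?_⟩
        exact (endswith_iff_tail lowered _ (mem_pvCodes_length _ hmem)).mpr rfl
      simp [hany, hmem]
    · have hany : pvCodes.any (fun c => PySem.Chars.endswith lowered c) = false := by
        refine List.any_eq_false.mpr ?_
        intro c hc hend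
        exact hmem (((endswith_iff_tail lowered c (mem_pvCodes_length _ hc)).mp hend) ▸ hc)
      simp [hany, hmem]
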